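-- pv_equiv track=rewrite | github.com/arian-askari/SOLIDLLM | solid_conversation/utils.py | trim_to_last_punctuation
-- ===== SOURCE A (Python) =====
-- def trim_to_last_punctuation(text):
--     """
--     Trims a string to include only the content up to the last punctuation mark ('.', '?', '!').
--     After that, it removes empty lines.
--     """
--
--     # Finding the last occurrence of punctuation marks
--     periods = text.rfind(".")
--     questions = text.rfind("?")
--     exclamations = text.rfind("!")
--
--     # Identifying the position of the last punctuation mark
--     last_punctuation = max(periods, questions, exclamations)
--
--     # Trim the text up to the last punctuation mark
--     if last_punctuation != -1:
--         text = text[: last_punctuation + 1]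
--
--     # Remove all empty lines
--     text = "\n".join([line for line in text.split("\n") if line.strip() != ""])
--
--     return text
-- ===== SOURCE B (Python) =====
-- def trim_to_last_punctuation(text):
--     """
--     Trims a string to include only the content up to the last punctuation mark ('.', '?', '!'),
--     found by a single early-stopping reverse scan, then removes empty lines with one
--     accumulator loop.
--     """
--     i = len(text) - 1
--     while i >= 0 and text[i] not in ".?!":
--         i -= 1
--     if i != -1:
--         text = text[: i + 1]
--     kept = []
--     for line in text.split("\n"):
--         if line.strip() != "":
--             kept.append(line)
--     return "\n".join(kept)
-- ===== Notes on version B (the rewrite author's own statement) =====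
-- stated objective: alternative
-- what changed: Replaces the three full-string rfind scans plus max with one early-stopping right-to-left scan for the last punctuation character, and the list-comprehension line filter with an explicit accumulator loop.
import Mathlib
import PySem

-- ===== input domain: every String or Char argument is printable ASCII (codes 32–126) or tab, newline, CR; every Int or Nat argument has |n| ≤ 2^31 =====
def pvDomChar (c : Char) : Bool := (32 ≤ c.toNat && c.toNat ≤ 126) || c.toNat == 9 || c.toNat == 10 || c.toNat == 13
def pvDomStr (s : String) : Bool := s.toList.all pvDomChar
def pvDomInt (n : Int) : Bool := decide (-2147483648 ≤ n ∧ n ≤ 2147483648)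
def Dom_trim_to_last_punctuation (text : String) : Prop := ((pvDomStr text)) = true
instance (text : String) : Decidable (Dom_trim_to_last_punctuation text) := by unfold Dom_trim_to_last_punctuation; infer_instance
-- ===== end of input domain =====

-- B replaces the three full-string rfind scans + max by one early-stopping reverse scan
-- for the last punctuation character, and the comprehension line filter by an accumulator loop.


-- ===== PORT A =====
def trim_to_last_punctuation (text : String) : String :=
  let periods := PySem.Str.rfind text "."
  let questions := PySem.Str.rfind text "?"
  let exclamations := PySem.Str.rfind text "!"
  let last_punctuation := max (max periods questions) exclamations
  let text1 := if last_punctuation ≠ -1 then PySem.Str.slice text none (some (last_punctuation + 1)) else text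
  -- text.split("\n"): the separator is nonempty, so split? is always `some`
  PySem.Str.join "\n" (((PySem.Str.split? text1 "\n").getD []).filter (fun line => PySem.Str.strip line != ""))

-- ===== PORT B =====
-- the while loop `while i >= 0 and text[i] not in ".?!": i -= 1`, walking the reversed characters
def pvFindLast : List Char → Int → Int
  | [], _ => -1
  | c :: rest, i => if c = '.' ∨ c = '?' ∨ c = '!' then i else pvFindLast rest (i - 1)

def trim_to_last_punctuation_alt (text : String) : String :=
  let i := pvFindLast text.toList.reverse ((text.toList.length : Int) - 1)
  let text1 := if i ≠ -1 then PySem.Str.slice text none (some (i + 1)) else text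
  let kept := ((PySem.Str.split? text1 "\n").getD []).foldl
      (fun acc line => if PySem.Str.strip line != "" then acc ++ [line] else acc) []
  PySem.Str.join "\n" kept

-- ===== PRECONDITION & SPEC =====
def Spec_trim_to_last_punctuation (text : String) (out : String) : Prop := out = trim_to_last_punctuation_alt text
instance (text : String) (out : String) : Decidable (Spec_trim_to_last_punctuation text out) := by unfold Spec_trim_to_last_punctuation; infer_instance

-- ===== CLAIM (what is proved, stated in full; the proofs are below) =====
def Claim_equal_trim_to_last_punctuation : Prop := ∀ (text : String), Dom_trim_to_last_punctuation text → Spec_trim_to_last_punctuation text (trim_to_last_punctuation text)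

-- ===== LEMMAS AND PROOFS =====

-- a single-character needle is a prefix iff it equals the head
theorem pv_prefix_single (d e : Char) (t : List Char) :
    [d].isPrefixOf (e :: t) = (d == e) := by
  simp [List.isPrefixOf]

-- rfind.go never exceeds its fuel
theorem pv_go_le (s : List Char) (d : Char) (k : Nat) :
    PySem.Chars.rfind.go s [d] k ≤ (k : Int) := by
  induction k with
  | zero => simp [PySem.Chars.rfind.go]; split <;> simp
  | succ k ih =>
      simp only [PySem.Chars.rfind.go]
      split
      · exact le_refl _
      · exact le_trans ih (by exact_mod_cast Nat.le_succ k)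

-- rfind of a single character is strictly below the length
theorem pv_rfind_single_lt (s : List Char) (d : Char) :
    PySem.Chars.rfind s [d] < (s.length : Int) := by
  cases h : s.length with
  | zero =>
      have hs : s = [] := List.eq_nil_of_length_eq_zero h
      subst hs
      simp [PySem.Chars.rfind, PySem.Chars.rfind.go, List.isPrefixOf]
  | succ n =>
      have : PySem.Chars.rfind s [d] = PySem.Chars.rfind.go s [d] n := by
        simp only [PySem.Chars.rfind, h, PySem.Chars.rfind.go]
        rw [List.drop_eq_nil_of_le (by omega)]
        simp [List.isPrefixOf]
      rw [this]
      have := pv_go_le s d n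
      omega

-- with fuel below cs.length, rfind.go does not see the appended character
theorem pv_go_append (cs : List Char) (c d : Char) (k : Nat) (hk : k < cs.length) :
    PySem.Chars.rfind.go (cs ++ [c]) [d] k = PySem.Chars.rfind.go cs [d] k := by
  induction k with
  | zero =>
      cases cs with
      | nil => simp at hk
      | cons e t => simp [PySem.Chars.rfind.go, List.isPrefixOf]
  | succ k ih =>
      simp only [PySem.Chars.rfind.go]
      rw [List.drop_append_of_le_length (le_of_lt hk)]
      rw [List.drop_eq_getElem_cons hk]
      simp only [List.cons_append, pv_prefix_single]
      split <;> [rfl; exact ih (by omega)]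

-- appending one character to the haystack
theorem pv_rfind_append (cs : List Char) (c d : Char) :
    PySem.Chars.rfind (cs ++ [c]) [d] =
      if c = d then (cs.length : Int) else PySem.Chars.rfind cs [d] := by
  cases cs with
  | nil =>
      simp only [PySem.Chars.rfind, List.nil_append, List.length, PySem.Chars.rfind.go]
      by_cases hcd : c = d
      · subst hcd; simp [List.isPrefixOf]
      · have hne : (d == c) = false := by
          simpa using fun h => hcd h.symm
        simp [List.isPrefixOf, hne, hcd]
  | cons e t =>
      have hlen : (e :: t ++ [c]).length = t.length + 2 := by simp
      have hlen2 : (e :: t).length = t.length + 1 := by simp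
      simp only [PySem.Chars.rfind, List.cons_append] at *
      rw [hlen, hlen2]
      simp only [PySem.Chars.rfind.go]
      rw [List.drop_eq_nil_of_le (by simp)]
      have hdrop : (e :: (t ++ [c])).drop (t.length + 1) = [c] := by
        have : (e :: (t ++ [c])).drop (t.length + 1) = (t ++ [c]).drop t.length := by simp
        rw [this, List.drop_append_of_le_length (le_refl _)]
        simp
      rw [hdrop]
      rw [List.drop_eq_nil_of_le (by simp)]
      simp only [List.isPrefixOf, Bool.and_true]
      by_cases hcd : c = d
      · subst hcd; simp
      · have hne : (d == c) = false := by
          simpa using fun h => hcd h.symm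
        simp only [hne, Bool.false_eq_true, if_false, if_neg hcd]
        have := pv_go_append (e :: t) c d t.length (by simp)
        simpa using this

-- helper abbreviating A's combined rfind value
theorem pv_max3_eq (cs : List Char) :
    max (max (PySem.Chars.rfind cs ['.']) (PySem.Chars.rfind cs ['?'])) (PySem.Chars.rfind cs ['!'])
      = pvFindLast cs.reverse ((cs.length : Int) - 1) := by
  induction cs using List.reverseRecOn with
  | nil => simp [PySem.Chars.rfind, PySem.Chars.rfind.go, List.isPrefixOf, pvFindLast]
  | append_singleton cs c ih =>
      rw [pv_rfind_append, pv_rfind_append, pv_rfind_append]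
      have hp := pv_rfind_single_lt cs '.'
      have hq := pv_rfind_single_lt cs '?'
      have he := pv_rfind_single_lt cs '!'
      rw [List.reverse_append]
      simp only [List.reverse_singleton, List.singleton_append, pvFindLast, List.length_append,
        List.length_singleton]
      have harith : ((cs.length + 1 : Nat) : Int) - 1 = (cs.length : Int) := by push_cast; ring
      rw [harith]
      by_cases h1 : c = '.'
      · subst h1
        rw [if_pos rfl, if_neg (by decide), if_neg (by decide), if_pos (Or.inl rfl)]
        omega
      · by_cases h2 : c = '?'
        · subst h2
          rw [if_neg (by decide), if_pos rfl, if_neg (by decide),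
            if_pos (Or.inr (Or.inl rfl))]
          omega
        · by_cases h3 : c = '!'
          · subst h3
            rw [if_neg (by decide), if_neg (by decide), if_pos rfl,
              if_pos (Or.inr (Or.inr rfl))]
            omega
          · have hno : ¬ (c = '.' ∨ c = '?' ∨ c = '!') := by tauto
            rw [if_neg h1, if_neg h2, if_neg h3, if_neg hno]
            exact ih

-- ===== VERDICT (by name: the statement is the Claim_ definition above) =====
theorem trim_to_last_punctuation_spec : Claim_equal_trim_to_last_punctuation := by
  intro text _
  unfold Spec_trim_to_last_punctuation trim_to_last_punctuation trim_to_last_punctuation_alt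
  have hidx : max (max (PySem.Str.rfind text ".") (PySem.Str.rfind text "?"))
      (PySem.Str.rfind text "!")
      = pvFindLast text.toList.reverse ((text.toList.length : Int) - 1) := by
    rw [PySem.Str.rfind_eq, PySem.Str.rfind_eq, PySem.Str.rfind_eq]
    exact pv_max3_eq text.toList
  simp only [← hidx]
  have hf : ∀ (l : List String),
      List.foldl (fun acc line => if (PySem.Str.strip line != "") = true then acc ++ [line] else acc) [] l
        = List.filter (fun line => PySem.Str.strip line != "") l := by
    intro l
    simpa using PySem.List.foldl_append_if (fun line => PySem.Str.strip line != "") id l []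
  rw [hf]
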